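-- pv_equiv track=rewrite | github.com/tanishqsujan/Problems-Of-Graphs | prob2.py | minrabbits
-- ===== SOURCE A (Python) =====
-- def minrabbits(answers, N):
--
--     #Initialize map
--     map = {}
--
--     #Traverse array and map arr[i] to the number of occurences
--     for a in range(N):
--
--         if answers[a] in map:
--             map[answers[a]] += 1
--         else:
--             map[answers[a]] = 1
--
--     #Initialize count as 0
--     count = 0
--
--     #Find the number groups and no. of rabbits in each group
--     for a in map:
--
--         x = a
--         y = map[a]
--
--         #Find number of groups and multiply them with number of rabbits in each group
--         if (y % (x + 1) == 0):
--             count = count + (y // (x + 1)) * (x + 1)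
--         else:
--             count = count + (y // (x + 1) + 1) * (x + 1)
--
--     #count gives minimum number of rabbits in the forest
--     return count
-- ===== SOURCE B (Python) =====
-- def minrabbits(answers, N):
--     # Single greedy pass: `remaining` maps an answer value to the open slots
--     # left in its current group; a new group of size x+1 opens when none are left.
--     remaining = {}
--     count = 0
--     for a in range(N):
--         x = answers[a]
--         if remaining.get(x, 0) > 0:
--             remaining[x] -= 1
--         else:
--             count += x + 1
--             remaining[x] = x
--     return count
-- ===== Notes on version B (the rewrite author's own statement) =====
-- stated objective: alternative
-- what changed: Replaces the two-phase count-then-ceiling-formula (build a frequency dict, then per distinct answer add ceil(y/(x+1))*(x+1)) with a single greedy pass that keeps, per answer value, the number of open slots in its current group and opens a new group of x+1 rabbits when none are left.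
-- outside the precondition, e.g. on minrabbits([-2], 1): A returns 1, B returns -1; on minrabbits([-1], 1): A raises ZeroDivisionError, B returns 0; on minrabbits([0, 0], 5): A raises IndexError, B raises IndexError
import Mathlib
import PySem

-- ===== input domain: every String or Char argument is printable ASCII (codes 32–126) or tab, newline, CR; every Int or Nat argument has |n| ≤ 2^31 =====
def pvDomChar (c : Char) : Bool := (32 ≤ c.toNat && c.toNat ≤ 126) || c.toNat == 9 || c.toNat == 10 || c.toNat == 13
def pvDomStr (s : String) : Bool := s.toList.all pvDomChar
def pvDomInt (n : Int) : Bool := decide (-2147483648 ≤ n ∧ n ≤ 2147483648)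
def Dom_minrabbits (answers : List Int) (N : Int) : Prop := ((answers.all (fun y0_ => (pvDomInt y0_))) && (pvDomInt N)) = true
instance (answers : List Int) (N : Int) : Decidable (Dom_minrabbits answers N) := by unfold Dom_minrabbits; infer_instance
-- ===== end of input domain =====

-- B replaces A's count-then-ceiling-formula two-phase computation by a single greedy pass
-- that tracks the open slots of each answer value's current group (objective: alternative single-pass algorithm).

-- ===== PORT A =====
def minrabbits (answers : List Int) (N : Int) : Int :=
  let m := (PySem.List.pyRange 0 N 1).foldl
    (fun m a =>
      let x := PySem.List.pyGetD answers a 0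
      if m.contains x then m.insert x (m.getD x 0 + 1) else m.insert x 1)
    PySem.Dict.empty
  m.keys.foldl
    (fun count a =>
      let x := a
      let y := m.getD a 0
      if PySem.Int.mod y (x + 1) = 0 then count + PySem.Int.floordiv y (x + 1) * (x + 1)
      else count + (PySem.Int.floordiv y (x + 1) + 1) * (x + 1))
    0

-- ===== PORT B =====
def minrabbits_alt (answers : List Int) (N : Int) : Int :=
  let st := (PySem.List.pyRange 0 N 1).foldl
    (fun st a =>
      let x := PySem.List.pyGetD answers a 0
      if st.1.getD x 0 > 0 then (st.1.insert x (st.1.getD x 0 - 1), st.2)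
      else (st.1.insert x x, st.2 + (x + 1)))
    (PySem.Dict.empty, 0)
  st.2

-- ===== PRECONDITION & SPEC =====
-- Pre_ excludes N > len(answers) (A raises IndexError) and negative answer values among the
-- first N, which are outside the problem's natural domain: A raises ZeroDivisionError on -1
-- and returns meaningless negative-group values on other negatives.
def Pre_minrabbits (answers : List Int) (N : Int) : Prop :=
  N ≤ (answers.length : Int) ∧ ∀ x ∈ answers.take N.toNat, 0 ≤ x
instance (answers : List Int) (N : Int) : Decidable (Pre_minrabbits answers N) := by
  unfold Pre_minrabbits; infer_instance
def pvWitness_minrabbits : List Int × Int := ([0, 1, 1, 2, 1], 5)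

def Spec_minrabbits (answers : List Int) (N : Int) (out : Int) : Prop := out = minrabbits_alt answers N
instance (answers : List Int) (N : Int) (out : Int) : Decidable (Spec_minrabbits answers N out) := by unfold Spec_minrabbits; infer_instance

-- ===== CLAIM (what is proved, stated in full; the proofs are below) =====
def Claim_equal_minrabbits : Prop := ∀ (answers : List Int) (N : Int), Dom_minrabbits answers N → Pre_minrabbits answers N → Spec_minrabbits answers N (minrabbits answers N)

-- ===== LEMMAS AND PROOFS =====

-- per-group cost A charges a value k occurring y times: ceil(y/(k+1))*(k+1), written as A writes it
def pvF (k y : Int) : Int :=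
  if PySem.Int.mod y (k + 1) = 0 then PySem.Int.floordiv y (k + 1) * (k + 1)
  else (PySem.Int.floordiv y (k + 1) + 1) * (k + 1)

-- B's loop body
def pvBStep (st : PySem.Dict Int Int × Int) (x : Int) : PySem.Dict Int Int × Int :=
  if st.1.getD x 0 > 0 then (st.1.insert x (st.1.getD x 0 - 1), st.2)
  else (st.1.insert x x, st.2 + (x + 1))

lemma pvF_zero (k : Int) (hk : 0 ≤ k) : pvF k 0 = 0 := by
  have hb : (0:Int) < k + 1 := by omega
  have hm : PySem.Int.mod 0 (k + 1) = 0 :=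
    (PySem.Int.mod_eq_zero_iff_dvd 0 (k + 1)).mpr (dvd_zero _)
  have hd : PySem.Int.floordiv 0 (k + 1) = 0 :=
    (PySem.Int.floordiv_eq_iff_of_pos hb).mpr ⟨by simp, by simpa using hb⟩
  unfold pvF
  rw [hm, hd]
  simp

lemma pvF_ge (k y : Int) (hk : 0 ≤ k) (_hy : 0 ≤ y) : y ≤ pvF k y := by
  have hb : (0:Int) < k + 1 := by omega
  have h1 := PySem.Int.floordiv_mul_add_mod y (k + 1)
  have h2 := PySem.Int.mod_nonneg y hb
  have h3 := PySem.Int.mod_lt y hb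
  have e : (PySem.Int.floordiv y (k + 1) + 1) * (k + 1)
      = PySem.Int.floordiv y (k + 1) * (k + 1) + (k + 1) := by ring
  unfold pvF
  split_ifs with h <;> [linarith; linarith [e]]

lemma pvF_succ (k y : Int) (hk : 0 ≤ k) (_hy : 0 ≤ y) :
    pvF k (y + 1) = if 0 < pvF k y - y then pvF k y else pvF k y + (k + 1) := by
  have hb : (0:Int) < k + 1 := by omega
  have h1 := PySem.Int.floordiv_mul_add_mod y (k + 1)
  have h2 := PySem.Int.mod_nonneg y hb
  have h3 := PySem.Int.mod_lt y hb
  set q := PySem.Int.floordiv y (k + 1) with hq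
  set r := PySem.Int.mod y (k + 1) with hr
  have h1' := PySem.Int.floordiv_mul_add_mod (y + 1) (k + 1)
  by_cases hcase : r + 1 < k + 1
  · have hq' : PySem.Int.floordiv (y + 1) (k + 1) = q := by
      rw [PySem.Int.floordiv_eq_iff_of_pos hb]
      constructor <;> nlinarith
    have hr' : PySem.Int.mod (y + 1) (k + 1) = r + 1 := by
      rw [hq'] at h1'; linarith
    unfold pvF
    rw [hq', hr', ← hq, ← hr]
    have hne : ¬ (r + 1 = 0) := by omega
    rw [if_neg hne]
    by_cases hr0 : r = 0
    · rw [if_pos hr0]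
      have : ¬ (0 < q * (k + 1) - y) := by rw [hr0] at h1; omega
      rw [if_neg this]; ring
    · rw [if_neg hr0]
      have : 0 < (q + 1) * (k + 1) - y := by nlinarith
      rw [if_pos this]
  · have hrk : r + 1 = k + 1 := by omega
    have hq' : PySem.Int.floordiv (y + 1) (k + 1) = q + 1 := by
      rw [PySem.Int.floordiv_eq_iff_of_pos hb]
      constructor <;> nlinarith
    have hr' : PySem.Int.mod (y + 1) (k + 1) = 0 := by
      rw [hq'] at h1'; nlinarith
    unfold pvF
    rw [hq', hr', ← hq, ← hr, if_pos rfl]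
    by_cases hr0 : r = 0
    · have hk0 : k = 0 := by omega
      rw [if_pos hr0]
      have : ¬ (0 < q * (k + 1) - y) := by rw [hr0] at h1; omega
      rw [if_neg this]; ring
    · rw [if_neg hr0]
      have : 0 < (q + 1) * (k + 1) - y := by nlinarith
      rw [if_pos this]

lemma pv_sum_map_update (S : List Int) (x : Int) (g g' : Int → Int)
    (hnd : S.Nodup) (hx : x ∈ S) (h : ∀ k ∈ S, k ≠ x → g' k = g k) :
    (S.map g').sum = (S.map g).sum + (g' x - g x) := by
  induction S with
  | nil => simp at hx
  | cons a S ih =>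
    rw [List.nodup_cons] at hnd
    rcases List.mem_cons.mp hx with rfl | hx'
    · have : S.map g' = S.map g := by
        apply List.map_congr_left
        intro k hk
        exact h k (by simp [hk]) (by rintro rfl; exact hnd.1 hk)
      simp [this]; ring
    · have hax : a ≠ x := by rintro rfl; exact hnd.1 hx'
      have := ih hnd.2 hx' (fun k hk hkx => h k (by simp [hk]) hkx)
      simp [this, h a (by simp) hax]; ring

-- B's loop invariant: after processing xs, slot k holds the open capacity of k's current
-- group, and the count equals A's per-value ceiling charges summed over the distinct values.
lemma pvB_inv (xs : List Int) (h : ∀ x ∈ xs, 0 ≤ x) :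
    (∀ k, 0 ≤ k →
      (xs.foldl pvBStep (PySem.Dict.empty, 0)).1.getD k 0 = pvF k (xs.count k) - xs.count k)
    ∧ (xs.foldl pvBStep (PySem.Dict.empty, 0)).2
        = ((PySem.Set.ofList xs).map (fun k => pvF k (xs.count k))).sum := by
  induction xs using List.reverseRecOn with
  | nil =>
    constructor
    · intro k hk
      simp [pvF_zero k hk]
    · simp [PySem.Set.ofList]
  | append_singleton xs x ih =>
    have hx : 0 ≤ x := h x (by simp)
    have hxs : ∀ a ∈ xs, 0 ≤ a := fun a ha => h a (by simp [ha])
    obtain ⟨iha, ihc⟩ := ih hxs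
    rw [List.foldl_append, List.foldl_cons, List.foldl_nil]
    set st := xs.foldl pvBStep (PySem.Dict.empty, 0) with hst
    have hslot : st.1.getD x 0 = pvF x (xs.count x) - xs.count x := iha x hx
    have hcnt : ∀ k : Int, (xs ++ [x]).count k = xs.count k + (if k = x then 1 else 0) := by
      intro k
      rw [List.count_append]
      congr 1
      by_cases hk : k = x
      · subst hk; simp
      · simp [List.count_singleton, hk]
        exact fun e => hk e.symm
    have hcge : (0:Int) ≤ xs.count x := by positivity
    have hsucc := pvF_succ x (xs.count x) hx (by positivity)
    by_cases hpos : st.1.getD x 0 > 0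
    · -- open slot: decrement, count unchanged
      have hmem : x ∈ xs := by
        by_contra hne
        rw [List.count_eq_zero_of_not_mem hne] at hslot
        push_cast at hslot
        rw [pvF_zero x hx] at hslot
        omega
      rw [pvBStep, if_pos hpos]
      constructor
      · intro k hk
        by_cases hkx : k = x
        · subst hkx
          rw [PySem.Dict.getD_insert_self, hslot, hcnt k, if_pos rfl]
          push_cast
          rw [hsucc, if_pos (by rw [← hslot]; exact hpos)]
          ring
        · rw [PySem.Dict.getD_insert_of_ne _ _ _ hkx, iha k hk, hcnt k, if_neg hkx]
          push_cast; ring_nf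
      · have hmem' : x ∈ PySem.Set.ofList xs := by
          rw [PySem.Set.mem_ofList]; exact hmem
        rw [PySem.Set.ofList_append_singleton, PySem.Set.add_of_mem hmem', ihc,
          pv_sum_map_update (PySem.Set.ofList xs) x
            (fun k => pvF k (xs.count k)) (fun k => pvF k (((xs ++ [x]).count k : Int)))
            (PySem.Set.nodup_ofList xs) hmem'
            (fun k _ hkx => by simp [hcnt k, hkx])]
        have hgx : pvF x (((xs ++ [x]).count x : Int)) = pvF x (xs.count x) := by
          rw [hcnt x, if_pos rfl]
          push_cast
          rw [hsucc, if_pos (by rw [← hslot]; exact hpos)]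
        rw [hgx]
        ring
    · -- no open slot: new group of x+1
      have hzero : st.1.getD x 0 = 0 := by
        have := pvF_ge x (xs.count x) hx (by positivity)
        omega
      rw [pvBStep, if_neg hpos]
      constructor
      · intro k hk
        by_cases hkx : k = x
        · subst hkx
          rw [PySem.Dict.getD_insert_self, hcnt k, if_pos rfl]
          push_cast
          rw [hsucc, if_neg (by rw [← hslot, hzero]; omega)]
          omega
        · rw [PySem.Dict.getD_insert_of_ne _ _ _ hkx, iha k hk, hcnt k, if_neg hkx]
          push_cast; ring_nf
      · by_cases hmem : x ∈ xs
        · have hmem' : x ∈ PySem.Set.ofList xs := by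
            rw [PySem.Set.mem_ofList]; exact hmem
          rw [PySem.Set.ofList_append_singleton, PySem.Set.add_of_mem hmem', ihc,
            pv_sum_map_update (PySem.Set.ofList xs) x
              (fun k => pvF k (xs.count k)) (fun k => pvF k (((xs ++ [x]).count k : Int)))
              (PySem.Set.nodup_ofList xs) hmem'
              (fun k _ hkx => by simp [hcnt k, hkx])]
          have hgx : pvF x (((xs ++ [x]).count x : Int)) = pvF x (xs.count x) + (x + 1) := by
            rw [hcnt x, if_pos rfl]
            push_cast
            rw [hsucc, if_neg (by rw [← hslot, hzero]; omega)]
          rw [hgx]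
          ring
        · rw [PySem.Set.ofList_append_singleton, PySem.Set.add_of_not_mem (by
            rw [PySem.Set.mem_ofList]; exact hmem)]
          rw [List.map_append, List.sum_append, ihc]
          have hc0 : xs.count x = 0 := List.count_eq_zero_of_not_mem hmem
          have hmapeq : (PySem.Set.ofList xs).map (fun k => pvF k (((xs ++ [x]).count k : Int)))
              = (PySem.Set.ofList xs).map (fun k => pvF k ((xs.count k : Int))) := by
            apply List.map_congr_left
            intro k hk
            have hkx : k ≠ x := by
              rintro rfl
              exact hmem ((PySem.Set.mem_ofList xs k).mp hk)
            simp [hcnt k, hkx]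
          rw [hmapeq]
          have hs := pvF_succ x 0 hx le_rfl
          rw [pvF_zero x hx] at hs
          norm_num at hs
          simp [hc0, hs]

-- reduce a 'for a in range(N): … answers[a] …' fold to a fold over the first-N prefix
lemma pv_prefix_fold {β : Type} (answers : List Int) (N : Int) (f : β → Int → β) (init : β)
    (h0 : 0 ≤ N) (hlen : N ≤ (answers.length : Int)) :
    (PySem.List.pyRange 0 N 1).foldl (fun acc j => f acc (PySem.List.pyGetD answers j 0)) init
      = (answers.take N.toNat).foldl f init := by
  have hlen' : ((answers.take N.toNat).length : Int) = N := by
    simp [List.length_take]; omega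
  have : (PySem.List.pyRange 0 N 1).foldl
      (fun acc j => f acc (PySem.List.pyGetD answers j 0)) init
      = (PySem.List.pyRange 0 N 1).foldl
      (fun acc j => f acc (PySem.List.pyGetD (answers.take N.toNat) j 0)) init := by
    apply PySem.List.foldl_congr_mem
    intro acc j hj
    rw [PySem.List.mem_pyRange_one] at hj
    rw [PySem.List.pyGetD_eq_getElem answers 0 hj.1 (by omega),
        PySem.List.pyGetD_eq_getElem (answers.take N.toNat) 0 hj.1 (by rw [hlen']; exact hj.2),
        List.getElem_take]
  rw [this]
  have h := PySem.List.foldl_pyRange_zero_pyGetD' (answers.take N.toNat) 0 f init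
  rwa [hlen'] at h

-- the concrete loop bodies of the two ports, as folds over the first-N prefix
lemma pvA_counter (t : List Int) :
    t.foldl (fun m x => if m.contains x then m.insert x (m.getD x 0 + 1) else m.insert x 1)
      PySem.Dict.empty = PySem.Dict.counter t := by
  rw [PySem.List.foldl_congr_mem t _
    (fun m x => m.insert x (m.getD x 0 + 1)) PySem.Dict.empty ?_]
  · exact PySem.Dict.foldl_insert_getD_add_one_eq_counter t
  · intro m x _
    dsimp only
    by_cases hc : m.contains x
    · rw [if_pos hc]
    · rw [if_neg hc, PySem.Dict.getD_of_not_contains m 0 (by simpa using hc)]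
      norm_num

lemma pvA_sum (t : List Int) :
    (PySem.Dict.counter t).keys.foldl
      (fun count a =>
        if PySem.Int.mod ((PySem.Dict.counter t).getD a 0) (a + 1) = 0 then
          count + PySem.Int.floordiv ((PySem.Dict.counter t).getD a 0) (a + 1) * (a + 1)
        else count + (PySem.Int.floordiv ((PySem.Dict.counter t).getD a 0) (a + 1) + 1) * (a + 1))
      0
      = ((PySem.Set.ofList t).map (fun k => pvF k (t.count k))).sum := by
  rw [PySem.Dict.keys_counter]
  rw [PySem.List.foldl_congr_mem (PySem.Set.ofList t) _
    (fun count a => count + pvF a (t.count a)) 0 ?_]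
  · rw [PySem.List.foldl_add]; ring
  · intro acc a _
    dsimp only
    rw [PySem.Dict.getD_counter]
    unfold pvF
    split_ifs <;> rfl

-- ===== VERDICT (by name: the statement is the Claim_ definition above) =====
theorem minrabbits_spec : Claim_equal_minrabbits := by
  intro answers N _ hpre
  obtain ⟨hlen, hnn⟩ := hpre
  unfold Spec_minrabbits minrabbits minrabbits_alt
  dsimp only
  by_cases h0 : 0 ≤ N
  case neg =>
    -- range(N) is empty for negative N: both programs return 0
    rw [PySem.List.pyRange_one_eq_nil (by omega)]
    rfl
  set t := answers.take N.toNat with ht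
  have hA1 : (PySem.List.pyRange 0 N 1).foldl
      (fun m a =>
        if m.contains (PySem.List.pyGetD answers a 0) then
          m.insert (PySem.List.pyGetD answers a 0) (m.getD (PySem.List.pyGetD answers a 0) 0 + 1)
        else m.insert (PySem.List.pyGetD answers a 0) 1)
      PySem.Dict.empty = PySem.Dict.counter t :=
    (pv_prefix_fold answers N
      (fun (m : PySem.Dict Int Int) x =>
        if m.contains x then m.insert x (m.getD x 0 + 1) else m.insert x 1)
      PySem.Dict.empty h0 hlen).trans (pvA_counter t)
  have hB1 : (PySem.List.pyRange 0 N 1).foldl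
      (fun st a =>
        if st.1.getD (PySem.List.pyGetD answers a 0) 0 > 0 then
          (st.1.insert (PySem.List.pyGetD answers a 0)
            (st.1.getD (PySem.List.pyGetD answers a 0) 0 - 1), st.2)
        else (st.1.insert (PySem.List.pyGetD answers a 0) (PySem.List.pyGetD answers a 0),
          st.2 + (PySem.List.pyGetD answers a 0 + 1)))
      (PySem.Dict.empty, 0) = t.foldl pvBStep (PySem.Dict.empty, 0) :=
    pv_prefix_fold answers N pvBStep (PySem.Dict.empty, 0) h0 hlen
  rw [hA1, hB1, pvA_sum t]
  exact ((pvB_inv t (fun x hx => hnn x hx)).2).symm
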